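-- pv_equiv track=rewrite | github.com/almoore/useful-scripts | api-scripts/clean_artifactory/vercmp.py | debian_lex_compare
-- ===== SOURCE A (Python) =====
-- class DebianComparisonException(Exception):
--     pass
--
-- def debian_lex_compare(a, b):
--     if a == b:
--         return 0
--     len_a = len(a)
--     len_b = len(b)
--     smaller_length = min(len_a, len_b)
--     for i in range(0, smaller_length):
--         if a[i] == "~" and b[i] != "~":
--             return -1
--         elif a[i] != "~" and b[i] == "~":
--             return 1
--         elif a[i].isalpha() and not b[i].isalpha():
--             return -1
--         elif not a[i].isalpha() and b[i].isalpha():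
--             return 1
--         elif a[i] != b[i]:
--             if a[i] < b[i]:
--                 return -1
--             elif a[i] > b[i]:
--                 return 1
--             else:
--                 raise DebianComparisonException("This is impossible")
--     if len_a == len_b:
--         return 0
--     elif len_a == smaller_length:
--         if b[smaller_length] == "~":
--             return 1
--         else:
--             return -1
--     elif len_b == smaller_length:
--         if a[smaller_length] == "~":
--             return -1
--         else:
--             return 1
--     else:
--         raise DebianComparisonException("This is impossible")
-- ===== SOURCE B (Python) =====
-- M = 0x110000  # above any Unicode code point, so ranks never collide with ords
--
-- def _key(c):
--     # rank 0: '~'; rank 2: alphabetic; rank 3: everything else.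
--     # rank 1 (the bare value M) is reserved for the end-of-string pad.
--     if c == "~":
--         return 0
--     return (2 * M if c.isalpha() else 3 * M) + ord(c)
--
-- def debian_lex_compare(a, b):
--     ka = [_key(c) for c in a]
--     kb = [_key(c) for c in b]
--     n = max(len(ka), len(kb))
--     ka += [M] * (n - len(ka))
--     kb += [M] * (n - len(kb))
--     return (ka > kb) - (ka < kb)
-- ===== Notes on version B (the rewrite author's own statement) =====
-- stated objective: idiomatic
-- what changed: Replaces the five-way branch cascade plus separate end-of-string cases by a per-character rank key ('~' < end-pad < alphabetic < other, then code point), padding both key lists to equal length and comparing them lexicographically with Python's list comparison.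
import Mathlib
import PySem

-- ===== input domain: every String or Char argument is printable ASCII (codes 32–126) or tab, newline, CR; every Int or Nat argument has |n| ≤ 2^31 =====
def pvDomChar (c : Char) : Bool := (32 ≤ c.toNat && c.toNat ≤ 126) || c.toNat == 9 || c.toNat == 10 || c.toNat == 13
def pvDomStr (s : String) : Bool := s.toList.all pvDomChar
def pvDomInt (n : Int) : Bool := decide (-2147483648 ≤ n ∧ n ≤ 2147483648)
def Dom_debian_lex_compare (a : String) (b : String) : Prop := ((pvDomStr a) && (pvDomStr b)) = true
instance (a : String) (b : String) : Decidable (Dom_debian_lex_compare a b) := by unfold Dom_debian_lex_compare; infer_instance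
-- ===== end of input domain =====

-- B replaces A's five-way branch cascade and separate end-of-string cases by
-- per-character rank keys compared lexicographically after padding (objective: more idiomatic).

-- ===== PORT A =====
-- A's index loop over range(min len) followed by the length/trailing-'~' checks,
-- as structural recursion over both character lists simultaneously.
def pvALoop : List Char → List Char → Int
  | [], [] => 0                                        -- len_a == len_b after the loop
  | [], y :: _ => if y = '~' then 1 else -1            -- len_a == smaller_length
  | x :: _, [] => if x = '~' then -1 else 1            -- len_b == smaller_length
  | x :: xs, y :: ys =>
    if x = '~' ∧ y ≠ '~' then -1
    else if x ≠ '~' ∧ y = '~' then 1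
    else if PySem.Chars.isalpha x ∧ ¬ PySem.Chars.isalpha y then -1
    else if ¬ PySem.Chars.isalpha x ∧ PySem.Chars.isalpha y then 1
    else if x ≠ y then
      -- Python: if a[i] < b[i]: -1 elif a[i] > b[i]: 1 else raise "impossible";
      -- by trichotomy of the character order the raise branch is unreachable.
      (if x < y then -1 else 1)
    else pvALoop xs ys

def debian_lex_compare (a : String) (b : String) : Int :=
  if a == b then 0 else pvALoop a.toList b.toList

-- ===== PORT B =====
-- Source B's key(c); M = 0x110000 = 1114112
def pvKey (c : Char) : Int :=
  if c = '~' then 0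
  else (if PySem.Chars.isalpha c then 2 * 1114112 else 3 * 1114112) + c.toNat

-- Python's built-in lexicographic list comparison, as (ka > kb) - (ka < kb)
def pvListCmp : List Int → List Int → Int
  | [], [] => 0
  | [], _ :: _ => -1
  | _ :: _, [] => 1
  | x :: xs, y :: ys => if x < y then -1 else if y < x then 1 else pvListCmp xs ys

def debian_lex_compare_alt (a : String) (b : String) : Int :=
  let ka := a.toList.map pvKey
  let kb := b.toList.map pvKey
  let n := max ka.length kb.length
  pvListCmp (ka ++ List.replicate (n - ka.length) 1114112)
            (kb ++ List.replicate (n - kb.length) 1114112)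

-- ===== PRECONDITION & SPEC =====
def Spec_debian_lex_compare (a : String) (b : String) (out : Int) : Prop := out = debian_lex_compare_alt a b
instance (a : String) (b : String) (out : Int) : Decidable (Spec_debian_lex_compare a b out) := by unfold Spec_debian_lex_compare; infer_instance

-- ===== CLAIM (what is proved, stated in full; the proofs are below) =====
def Claim_equal_debian_lex_compare : Prop := ∀ (a : String) (b : String), Dom_debian_lex_compare a b → Spec_debian_lex_compare a b (debian_lex_compare a b)

-- ===== LEMMAS AND PROOFS =====

theorem pvToNat_lt (c : Char) : c.toNat < 1114112 := by
  unfold Char.toNat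
  rcases c.valid with h | ⟨_, h⟩ <;> omega

theorem pvKey_tilde : pvKey '~' = 0 := rfl

theorem pvM_lt_key {y : Char} (h : y ≠ '~') : 1114112 < pvKey y := by
  have hy := pvToNat_lt y
  simp only [pvKey, if_neg h]
  split <;> omega

theorem pvChar_lt_iff (x y : Char) : x < y ↔ (x.toNat : Int) < y.toNat := by
  rw [Char.lt_def, UInt32.lt_iff_toNat_lt]
  exact Iff.symm Int.ofNat_lt

theorem pvToNat_inj {x y : Char} (h : x.toNat = y.toNat) : x = y :=
  Char.ext (UInt32.toNat_inj.mp h)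

theorem pvKey_inj {x y : Char} (h : pvKey x = pvKey y) : x = y := by
  have hx := pvToNat_lt x
  have hy := pvToNat_lt y
  unfold pvKey at h
  split_ifs at h <;> first
    | (apply pvToNat_inj; omega)
    | (exact ‹x = '~'›.trans ‹y = '~'›.symm)

-- A's branch cascade on two unequal characters computes the sign of pvKey x - pvKey y
theorem pvA_head (x y : Char) (hne : x ≠ y) (r : Int) :
    (if x = '~' ∧ y ≠ '~' then (-1 : Int)
     else if x ≠ '~' ∧ y = '~' then 1
     else if PySem.Chars.isalpha x ∧ ¬ PySem.Chars.isalpha y then -1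
     else if ¬ PySem.Chars.isalpha x ∧ PySem.Chars.isalpha y then 1
     else if x ≠ y then (if x < y then -1 else 1)
     else r)
    = if pvKey x < pvKey y then -1 else 1 := by
  have hx := pvToNat_lt x
  have hy := pvToNat_lt y
  have hkne : pvKey x ≠ pvKey y := fun h => hne (pvKey_inj h)
  have hlt := pvChar_lt_iff x y
  have hgt := pvChar_lt_iff y x
  have htri : x < y ∨ y < x := by
    rcases lt_trichotomy ((x.toNat : Int)) y.toNat with h | h | h
    · exact Or.inl (hlt.mpr h)
    · exact absurd (pvToNat_inj (by exact_mod_cast h)) hne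
    · exact Or.inr (hgt.mpr h)
  unfold pvKey at hkne ⊢
  split_ifs <;> simp_all <;> omega

theorem pvALoop_eq (xs : List Char) : ∀ ys : List Char,
    pvALoop xs ys =
      pvListCmp (xs.map pvKey ++ List.replicate (max xs.length ys.length - xs.length) 1114112)
                (ys.map pvKey ++ List.replicate (max xs.length ys.length - ys.length) 1114112) := by
  induction xs with
  | nil =>
    intro ys
    cases ys with
    | nil => rfl
    | cons y ys =>
      simp only [pvALoop, List.map_nil, List.map_cons, List.nil_append, List.length_nil,
        List.length_cons, Nat.zero_max, Nat.sub_zero, Nat.sub_self, List.replicate_zero,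
        List.append_nil]
      rw [List.replicate_succ]
      by_cases h : y = '~'
      · subst h; simp [pvListCmp, pvKey_tilde]
      · have hM := pvM_lt_key h
        simp [pvListCmp, h, hM]
  | cons x xs ih =>
    intro ys
    cases ys with
    | nil =>
      simp only [pvALoop, List.map_nil, List.map_cons, List.nil_append, List.length_nil,
        List.length_cons, Nat.max_zero, Nat.sub_zero, Nat.sub_self, List.replicate_zero,
        List.append_nil]
      rw [List.replicate_succ]
      by_cases h : x = '~'
      · subst h; simp [pvListCmp, pvKey_tilde]
      · have hM := pvM_lt_key h
        simp [pvListCmp, h, hM, not_lt.mpr hM.le]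
    | cons y ys =>
      have hsub : max (xs.length + 1) (ys.length + 1) - (xs.length + 1)
          = max xs.length ys.length - xs.length := by omega
      have hsub' : max (xs.length + 1) (ys.length + 1) - (ys.length + 1)
          = max xs.length ys.length - ys.length := by omega
      simp only [pvALoop, List.map_cons, List.length_cons, List.cons_append, hsub, hsub']
      simp only [pvListCmp]
      by_cases hxy : x = y
      · subst hxy
        simp only [ne_eq, not_true_eq_false, if_false, and_not_self,
          not_and_self, lt_irrefl]
        simp [ih ys]
      · rw [pvA_head x y hxy (pvALoop xs ys)]
        have hkne : pvKey x ≠ pvKey y := fun h => hxy (pvKey_inj h)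
        by_cases hk : pvKey x < pvKey y
        · simp [hk]
        · have hk' : pvKey y < pvKey x := by omega
          simp [hk, hk']

theorem pvListCmp_refl (l : List Int) : pvListCmp l l = 0 := by
  induction l with
  | nil => rfl
  | cons x xs ih => simp [pvListCmp, ih]

-- ===== VERDICT (by name: the statement is the Claim_ definition above) =====
theorem debian_lex_compare_spec : Claim_equal_debian_lex_compare := by
  intro a b _
  show debian_lex_compare a b = debian_lex_compare_alt a b
  unfold debian_lex_compare debian_lex_compare_alt
  by_cases h : a = b
  · subst h
    simp [pvListCmp_refl]
  · rw [if_neg (by simpa using h), pvALoop_eq]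
    simp
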